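-- pv_equiv track=rewrite | github.com/FranciscoLopes21/Projeto_IA | Custo_Uniforme.py | encontrarMenorNo
-- ===== SOURCE A (Python) =====
-- def encontrarMenorNo (cidadesParaExpandir):
--     distancia = cidadesParaExpandir[0]['distancia']
--     cidade = cidadesParaExpandir[0]
--
--     for candidato in cidadesParaExpandir:
--         if (candidato['distancia'] < distancia):
--             distancia = candidato['distancia']
--             cidade = candidato
--
--     return cidade
-- ===== SOURCE B (Python) =====
-- def encontrarMenorNo(cidadesParaExpandir):
--     return sorted(cidadesParaExpandir, key=lambda c: c['distancia'])[0]
-- ===== Notes on version B (the rewrite author's own statement) =====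
-- stated objective: alternative
-- what changed: B stably sorts the whole list by the 'distancia' key and returns the first element, instead of A's running-minimum accumulator scan; stability makes ties keep the first minimum exactly as A's strict '<' does.
import Mathlib
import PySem

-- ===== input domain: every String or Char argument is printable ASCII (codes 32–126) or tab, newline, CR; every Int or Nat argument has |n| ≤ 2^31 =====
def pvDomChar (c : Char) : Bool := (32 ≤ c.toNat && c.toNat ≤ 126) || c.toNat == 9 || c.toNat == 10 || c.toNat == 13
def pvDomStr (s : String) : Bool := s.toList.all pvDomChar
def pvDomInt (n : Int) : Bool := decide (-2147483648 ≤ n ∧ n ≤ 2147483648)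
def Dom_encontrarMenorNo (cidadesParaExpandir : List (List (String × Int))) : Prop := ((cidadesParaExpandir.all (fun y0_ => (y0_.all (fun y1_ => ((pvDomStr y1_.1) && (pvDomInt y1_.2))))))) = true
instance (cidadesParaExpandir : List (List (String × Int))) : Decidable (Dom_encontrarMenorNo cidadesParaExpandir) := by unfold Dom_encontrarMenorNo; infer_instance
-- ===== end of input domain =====

-- B replaces A's running-minimum scan by a stable sort on the 'distancia' key followed by
-- taking the first element (alternative decomposition, not faster).


-- ===== PORT A =====
def encontrarMenorNo (cidadesParaExpandir : List (List (String × Int))) : List (String × Int) :=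
  match cidadesParaExpandir with
  | [] => []            -- Python: IndexError on cidadesParaExpandir[0]; excluded by Pre_
  | c0 :: _ =>
    match (PySem.Dict.mk c0).get? "distancia" with
    | none => []        -- Python: KeyError; excluded by Pre_
    | some d0 =>
      (cidadesParaExpandir.foldl
        (fun (st : Int × List (String × Int)) cand =>
          match (PySem.Dict.mk cand).get? "distancia" with
          | none => st  -- Python: KeyError; excluded by Pre_
          | some dc => if dc < st.1 then (dc, cand) else st)
        (d0, c0)).2

-- ===== PORT B =====
-- total stand-in for the key lambda c['distancia']: under Pre_ the key is present, so getD = the value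
def pvKey (c : List (String × Int)) : Int := (PySem.Dict.mk c).getD "distancia" 0

def encontrarMenorNo_alt (cidadesParaExpandir : List (List (String × Int))) : List (String × Int) :=
  match PySem.List.sorted cidadesParaExpandir pvKey false with
  | [] => []            -- Python: IndexError on [0]; excluded by Pre_
  | m :: _ => m

-- ===== PRECONDITION & SPEC =====
-- Pre_ excludes exactly the inputs where the Python A raises: the empty list (IndexError) and
-- lists containing a dict without the 'distancia' key (KeyError).
def Pre_encontrarMenorNo (cidadesParaExpandir : List (List (String × Int))) : Prop :=
  cidadesParaExpandir ≠ [] ∧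
    ∀ c ∈ cidadesParaExpandir, ((PySem.Dict.mk c).get? "distancia").isSome = true
instance (cidadesParaExpandir : List (List (String × Int))) : Decidable (Pre_encontrarMenorNo cidadesParaExpandir) := by unfold Pre_encontrarMenorNo; infer_instance

def pvWitness_encontrarMenorNo : (List (List (String × Int))) :=
  [[("distancia", 3), ("nome", 1)], [("distancia", 2)], [("distancia", 2)]]

def Spec_encontrarMenorNo (cidadesParaExpandir : List (List (String × Int))) (out : List (String × Int)) : Prop := out = encontrarMenorNo_alt cidadesParaExpandir
instance (cidadesParaExpandir : List (List (String × Int))) (out : List (String × Int)) : Decidable (Spec_encontrarMenorNo cidadesParaExpandir out) := by unfold Spec_encontrarMenorNo; infer_instance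

-- ===== CLAIM (what is proved, stated in full; the proofs are below) =====
def Claim_equal_encontrarMenorNo : Prop := ∀ (cidadesParaExpandir : List (List (String × Int))), Dom_encontrarMenorNo cidadesParaExpandir → Pre_encontrarMenorNo cidadesParaExpandir → Spec_encontrarMenorNo cidadesParaExpandir (encontrarMenorNo cidadesParaExpandir)

-- ===== LEMMAS AND PROOFS =====

-- running minimum over the elements only (the common shape both sides reduce to)
def pvRunMin (l : List (List (String × Int))) (c : List (String × Int)) : List (String × Int) :=
  l.foldl (fun c x => if pvKey x < pvKey c then x else c) c

-- A's (distance, city) fold carries (pvKey c, c) as an invariant when every key is present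
theorem a_fold_eq_runMin (l : List (List (String × Int))) (c : List (String × Int))
    (h : ∀ x ∈ l, ((PySem.Dict.mk x).get? "distancia").isSome = true) :
    l.foldl
      (fun (st : Int × List (String × Int)) cand =>
        match (PySem.Dict.mk cand).get? "distancia" with
        | none => st
        | some dc => if dc < st.1 then (dc, cand) else st)
      (pvKey c, c) = (pvKey (pvRunMin l c), pvRunMin l c) := by
  induction l generalizing c with
  | nil => simp [pvRunMin]
  | cons x t ih =>
    have hx := h x (by simp)
    obtain ⟨v, hv⟩ := Option.isSome_iff_exists.mp hx
    have hkx : pvKey x = v := by simp [pvKey, PySem.Dict.getD_eq_get?_getD, hv]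
    have ht : ∀ y ∈ t, ((PySem.Dict.mk y).get? "distancia").isSome = true :=
      fun y hy => h y (by simp [hy])
    simp only [List.foldl_cons, pvRunMin, hv, hkx]
    by_cases hlt : v < pvKey c
    · simpa [hlt, pvRunMin, hkx] using ih x ht
    · simpa [hlt, pvRunMin] using ih c ht

-- head of the stable insertion-sort fold, started on a nonempty accumulator
theorem insert_fold_head (before : List (String × Int) → List (String × Int) → Bool)
    (l : List (List (String × Int))) (h : List (String × Int)) (t : List (List (String × Int))) :
    ∃ t', l.foldl (fun acc x => PySem.List.insertBy before x acc) (h :: t) =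
      (l.foldl (fun c x => if before x c then x else c) h) :: t' := by
  induction l generalizing h t with
  | nil => exact ⟨t, rfl⟩
  | cons x l ih =>
    simp only [List.foldl_cons, PySem.List.insertBy]
    by_cases hb : before x h = true
    · simpa [hb] using ih x (h :: t)
    · simpa [hb] using ih h (PySem.List.insertBy before x t)

-- ===== VERDICT (by name: the statement is the Claim_ definition above) =====
theorem encontrarMenorNo_spec : Claim_equal_encontrarMenorNo := by
  intro xs _ hpre
  obtain ⟨hne, hkeys⟩ := hpre
  unfold Spec_encontrarMenorNo
  cases xs with
  | nil => exact absurd rfl hne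
  | cons c0 t =>
    obtain ⟨d0, hd0⟩ := Option.isSome_iff_exists.mp (hkeys c0 (by simp))
    have hk0 : pvKey c0 = d0 := by simp [pvKey, PySem.Dict.getD_eq_get?_getD, hd0]
    -- A reduces to the running minimum over t started at c0
    have hA : encontrarMenorNo (c0 :: t) = pvRunMin t c0 := by
      have ht : ∀ y ∈ t, ((PySem.Dict.mk y).get? "distancia").isSome = true :=
        fun y hy => hkeys y (by simp [hy])
      simp only [encontrarMenorNo, hd0, List.foldl_cons, lt_irrefl, if_false]
      rw [← hk0, a_fold_eq_runMin t c0 ht]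
    -- B reduces to the same running minimum: head of the stable sort
    have hB : encontrarMenorNo_alt (c0 :: t) = pvRunMin t c0 := by
      unfold encontrarMenorNo_alt
      rw [PySem.List.sorted_eq_foldl_insertBy]
      simp only [List.foldl_cons, PySem.List.insertBy]
      obtain ⟨t', ht'⟩ := insert_fold_head (fun a b => decide (pvKey a < pvKey b)) t c0 []
      rw [ht']
      simp [pvRunMin]
    rw [hA, hB]
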